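-- pv_equiv track=rewrite | github.com/ouerum/neural-FEBI | FBD/tag_recognize.py | forward_dataflow_analysis_context
-- ===== SOURCE A (Python) =====
-- def forward_dataflow_analysis_context(op_stacks):
--     result = ""
--     none_accumulator = 0
--     for i in range(0, min(len(op_stacks), 50)):
--         if op_stacks[i] is not None:
--             if none_accumulator == 0:
--                 result += (" " + str(op_stacks[i]))
--             else:
--                 result += ("*" + str(none_accumulator) + " " + str(op_stacks[i]))
--                 none_accumulator = 0
--         else:
--             none_accumulator += 1
--     if none_accumulator != 0:
--         result += ("*" + str(none_accumulator))
--     return result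
-- ===== SOURCE B (Python) =====
-- def forward_dataflow_analysis_context(op_stacks):
--     prefix = op_stacks[:50]
--     n = len(prefix)
--     parts = []
--     i = 0
--     while i < n:
--         if prefix[i] is None:
--             j = i
--             while j < n and prefix[j] is None:
--                 j += 1
--             parts.append("*" + str(j - i))
--             i = j
--         else:
--             parts.append(" " + str(prefix[i]))
--             i += 1
--     return "".join(parts)
-- ===== Notes on version B (the rewrite author's own statement) =====
-- stated objective: alternative
-- what changed: A threads a (result, none_accumulator) state through one pass with branch-on-accumulator emission; B instead scans the 50-prefix by maximal runs (two-pointer run detection), emitting one '*<runlength>' token per None-run and one ' <v>' token per value, and joins the token list at the end.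
import Mathlib
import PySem

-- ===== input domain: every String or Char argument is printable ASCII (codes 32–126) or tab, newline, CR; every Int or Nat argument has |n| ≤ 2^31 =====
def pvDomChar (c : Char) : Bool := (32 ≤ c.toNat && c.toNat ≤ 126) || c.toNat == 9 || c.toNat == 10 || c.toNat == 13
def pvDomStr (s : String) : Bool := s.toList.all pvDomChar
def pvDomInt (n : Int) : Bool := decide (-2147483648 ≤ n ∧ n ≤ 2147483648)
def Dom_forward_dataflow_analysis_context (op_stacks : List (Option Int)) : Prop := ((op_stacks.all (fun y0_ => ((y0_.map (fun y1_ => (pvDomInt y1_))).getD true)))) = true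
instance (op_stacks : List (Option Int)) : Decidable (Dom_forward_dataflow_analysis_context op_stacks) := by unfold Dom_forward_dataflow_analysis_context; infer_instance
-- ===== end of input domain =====

-- ===== PORT A =====
-- A: one forward pass threading (result, none_accumulator); transliterated as a foldl
-- over the first min(len, 50) elements (what range(0, min(len, 50)) + indexing visits).
def fdacStep (st : String × Int) (o : Option Int) : String × Int :=
  match o with
  | some v =>
      if st.2 = 0 then (st.1 ++ (" " ++ PySem.Int.toStr v), st.2)
      else (st.1 ++ ("*" ++ PySem.Int.toStr st.2 ++ " " ++ PySem.Int.toStr v), 0)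
  | none => (st.1, st.2 + 1)

def fdacFin (p : String × Int) : String :=
  if p.2 ≠ 0 then p.1 ++ ("*" ++ PySem.Int.toStr p.2) else p.1

def forward_dataflow_analysis_context (op_stacks : List (Option Int)) : String :=
  fdacFin ((op_stacks.take 50).foldl fdacStep ("", 0))

-- ===== PORT B =====
-- B: token list over runs — each maximal None-run yields one "*<len>" token, each
-- value yields one " <v>" token; the tokens are joined ("".join) at the end.
def fdacTokens : List (Option Int) → List String
  | [] => []
  | some v :: rest => (" " ++ PySem.Int.toStr v) :: fdacTokens rest
  | none :: rest =>
      ("*" ++ PySem.Int.toStr (((1 + (rest.takeWhile Option.isNone).length : Nat) : Int)))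
        :: fdacTokens (rest.dropWhile Option.isNone)
termination_by l => l.length
decreasing_by
  · simp
  · have := List.length_dropWhile_le (p := Option.isNone) (l := rest)
    simp; omega

def forward_dataflow_analysis_context_alt (op_stacks : List (Option Int)) : String :=
  PySem.Str.join "" (fdacTokens (op_stacks.take 50))

-- ===== PRECONDITION & SPEC =====
def Spec_forward_dataflow_analysis_context (op_stacks : List (Option Int)) (out : String) : Prop := out = forward_dataflow_analysis_context_alt op_stacks
instance (op_stacks : List (Option Int)) (out : String) : Decidable (Spec_forward_dataflow_analysis_context op_stacks out) := by unfold Spec_forward_dataflow_analysis_context; infer_instance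

-- ===== CLAIM (what is proved, stated in full; the proofs are below) =====
def Claim_equal_forward_dataflow_analysis_context : Prop := ∀ (op_stacks : List (Option Int)), Dom_forward_dataflow_analysis_context op_stacks → Spec_forward_dataflow_analysis_context op_stacks (forward_dataflow_analysis_context op_stacks)

-- ===== LEMMAS AND PROOFS =====

-- What A's loop will still output given pending accumulator a and remaining input l.
def fdacEmit : Int → List (Option Int) → String
  | a, [] => if a ≠ 0 then "*" ++ PySem.Int.toStr a else ""
  | a, some v :: rest =>
      (if a = 0 then " " ++ PySem.Int.toStr v
       else "*" ++ PySem.Int.toStr a ++ " " ++ PySem.Int.toStr v) ++ fdacEmit 0 rest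
  | a, none :: rest => fdacEmit (a + 1) rest

theorem fdac_join_nil : PySem.Str.join "" ([] : List String) = "" := by
  simp [PySem.Str.join]

theorem fdac_join_cons (t : String) (ts : List String) :
    PySem.Str.join "" (t :: ts) = t ++ PySem.Str.join "" ts := by
  apply String.toList_inj.mp
  simp only [PySem.Str.toList_join, PySem.Chars.join, List.map_cons, String.toList_append]
  cases ts <;> simp [List.intercalate]

theorem fdac_star (x y : Int) (s : String) (h : x = y) :
    "*" ++ PySem.Int.toStr x ++ s = "*" ++ PySem.Int.toStr y ++ s := by rw [h]

theorem fdac_loop (l : List (Option Int)) : ∀ (s : String) (a : Int),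
    fdacFin (l.foldl fdacStep (s, a)) = s ++ fdacEmit a l := by
  induction l with
  | nil =>
      intro s a
      simp only [List.foldl_nil, fdacFin, fdacEmit]
      split_ifs <;> simp
  | cons o rest ih =>
      intro s a
      match o with
      | some v =>
          by_cases h : a = 0 <;>
            simp [List.foldl_cons, fdacStep, fdacEmit, h, ih, String.append_assoc]
      | none =>
          simp [List.foldl_cons, fdacStep, fdacEmit, ih]

-- emit with no pending run is B's joined tokens; emit with a pending nonzero run is
-- one "*" token absorbing the adjacent None-run, then the joined remaining tokens
theorem fdac_emit_tokens (n : Nat) : ∀ (l : List (Option Int)), l.length ≤ n →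
    (fdacEmit 0 l = PySem.Str.join "" (fdacTokens l)) ∧
    (∀ a : Int, 0 < a →
      fdacEmit a l = "*" ++ PySem.Int.toStr (a + ((l.takeWhile Option.isNone).length : Int))
        ++ PySem.Str.join "" (fdacTokens (l.dropWhile Option.isNone))) := by
  induction n with
  | zero =>
      intro l hl
      have : l = [] := List.eq_nil_of_length_eq_zero (Nat.le_zero.mp hl)
      subst this
      constructor
      · simp [fdacEmit, fdacTokens, fdac_join_nil]
      · intro a ha
        simp [fdacEmit, fdacTokens, ha.ne', fdac_join_nil]
  | succ n ih =>
      intro l hl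
      match l with
      | [] =>
          constructor
          · simp [fdacEmit, fdacTokens, fdac_join_nil]
          · intro a ha
            simp [fdacEmit, fdacTokens, ha.ne', fdac_join_nil]
      | some v :: rest =>
          have hr : rest.length ≤ n := by simp at hl; omega
          constructor
          · simp [fdacEmit, fdacTokens, fdac_join_cons, (ih rest hr).1, String.append_assoc]
          · intro a ha
            simp [fdacEmit, fdacTokens, ha.ne', fdac_join_cons, (ih rest hr).1,
              String.append_assoc]
      | none :: rest =>
          have hr : rest.length ≤ n := by
            simp only [List.length_cons] at hl; omega
          have htk : ((none : Option Int) :: rest).takeWhile Option.isNone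
              = none :: rest.takeWhile Option.isNone := by simp
          have hdk : ((none : Option Int) :: rest).dropWhile Option.isNone
              = rest.dropWhile Option.isNone := by simp
          have key : ∀ a : Int, 0 < a →
              fdacEmit a (none :: rest)
                = "*" ++ PySem.Int.toStr (a + (((none :: rest).takeWhile Option.isNone).length : Int))
                  ++ PySem.Str.join "" (fdacTokens ((none :: rest).dropWhile Option.isNone)) := by
            intro a ha
            have h2 := (ih rest hr).2 (a + 1) (by omega)
            have e1 : fdacEmit a (none :: rest) = fdacEmit (a + 1) rest := by
              simp [fdacEmit]
            rw [e1, h2, htk, hdk, List.length_cons]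
            apply fdac_star
            push_cast
            ring
          refine ⟨?_, key⟩
          have h2 := (ih rest hr).2 1 one_pos
          have e1 : fdacEmit 0 (none :: rest) = fdacEmit 1 rest := by
            simp [fdacEmit]
          have etok : fdacTokens (none :: rest)
              = ("*" ++ PySem.Int.toStr (((1 + (rest.takeWhile Option.isNone).length : Nat) : Int)))
                :: fdacTokens (rest.dropWhile Option.isNone) := by
            simp [fdacTokens]
          rw [e1, h2, etok, fdac_join_cons, String.append_assoc]
          rw [String.append_assoc]
          apply fdac_star
          push_cast
          ring

-- ===== VERDICT (by name: the statement is the Claim_ definition above) =====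
theorem forward_dataflow_analysis_context_spec : Claim_equal_forward_dataflow_analysis_context := by
  intro op_stacks _
  unfold Spec_forward_dataflow_analysis_context forward_dataflow_analysis_context
    forward_dataflow_analysis_context_alt
  rw [fdac_loop]
  rw [(fdac_emit_tokens (op_stacks.take 50).length (op_stacks.take 50) le_rfl).1]
  simp
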